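-- pv_equiv track=rewrite | github.com/rouge1/light-cam-canto | protocol/frame.py | strip_resync_symbols
-- ===== SOURCE A (Python) =====
-- DEFAULT_CHUNK_SYMS = 48
--
-- DEFAULT_RESYNC_SYMS = 16
--
-- def strip_resync_symbols(
--     symbols_after_sync: list[int],
--     chunk_syms: int = DEFAULT_CHUNK_SYMS,
--     resync_syms: int = DEFAULT_RESYNC_SYMS,
-- ) -> list[int]:
--     """Remove resync blocks from a symbol stream that starts right after SYNC.
--
--     Assumes TX inserted `resync_syms` symbols after every `chunk_syms` data
--     symbols. The last chunk may be shorter and has no trailing resync.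
--     """
--     out: list[int] = []
--     i = 0
--     n = len(symbols_after_sync)
--     while i < n:
--         out.extend(symbols_after_sync[i:i + chunk_syms])
--         i += chunk_syms
--         if i < n:
--             i += resync_syms
--     return out
-- ===== SOURCE B (Python) =====
-- DEFAULT_CHUNK_SYMS = 48
--
-- DEFAULT_RESYNC_SYMS = 16
--
-- def strip_resync_symbols(
--     symbols_after_sync: list[int],
--     chunk_syms: int = DEFAULT_CHUNK_SYMS,
--     resync_syms: int = DEFAULT_RESYNC_SYMS,
-- ) -> list[int]:
--     """Keep exactly the symbols whose flat index falls in the data part of each period."""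
--     period = chunk_syms + resync_syms
--     return [s for i, s in enumerate(symbols_after_sync) if i % period < chunk_syms]
-- ===== Notes on version B (the rewrite author's own statement) =====
-- stated objective: simpler
-- what changed: Replaces the block-slicing while-loop with index jumping by a single per-element filter keeping every symbol whose flat index i satisfies i % (chunk_syms+resync_syms) < chunk_syms.
-- outside the precondition, e.g. on strip_resync_symbols([1, 2, 3, 4, 5], -1, 5): A returns [1, 2, 3, 4], B returns []; on strip_resync_symbols([1, 2, 3], 2, -1): A returns [1, 2, 2, 3], B returns [1, 2, 3]
import Mathlib
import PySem

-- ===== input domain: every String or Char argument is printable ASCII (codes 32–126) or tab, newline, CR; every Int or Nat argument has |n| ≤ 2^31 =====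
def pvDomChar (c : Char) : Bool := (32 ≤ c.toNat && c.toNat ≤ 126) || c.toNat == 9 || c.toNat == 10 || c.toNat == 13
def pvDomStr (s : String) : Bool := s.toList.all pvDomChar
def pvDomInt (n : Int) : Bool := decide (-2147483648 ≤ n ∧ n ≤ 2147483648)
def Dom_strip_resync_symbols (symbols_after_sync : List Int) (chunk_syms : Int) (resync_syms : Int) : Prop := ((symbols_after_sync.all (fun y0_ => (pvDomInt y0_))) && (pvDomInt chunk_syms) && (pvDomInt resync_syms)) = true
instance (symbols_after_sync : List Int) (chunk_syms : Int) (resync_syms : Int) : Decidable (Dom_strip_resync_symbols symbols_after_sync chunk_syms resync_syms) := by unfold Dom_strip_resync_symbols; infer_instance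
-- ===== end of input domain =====

-- B replaces A's block-slicing while-loop by a single per-index modulo filter (objective: simpler).

-- ===== PORT A =====
-- literal port of A's while-loop; the `if h : i < i2` guard only makes the
-- recursion total where Python's loop would not advance (it diverges there, outside Pre_)
def stripLoopA (xs : List Int) (c r n : Int) (i : Int) (out : List Int) : List Int :=
  if _h : i < n then
    let out' := out ++ PySem.List.slice xs (some i) (some (i + c))
    let i2 := if i + c < n then (i + c) + r else i + c
    if h2 : i < i2 then stripLoopA xs c r n i2 out' else out'
  else out
termination_by (n - i).toNat
decreasing_by simp only [i2] at h2; by_cases hb : i + c < n <;> simp [hb] at h2 ⊢ <;> omega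

def strip_resync_symbols (symbols_after_sync : List Int) (chunk_syms : Int) (resync_syms : Int) : List Int :=
  stripLoopA symbols_after_sync chunk_syms resync_syms (symbols_after_sync.length : Int) 0 []

-- ===== PORT B =====
def strip_resync_symbols_alt (symbols_after_sync : List Int) (chunk_syms : Int) (resync_syms : Int) : List Int :=
  let period := chunk_syms + resync_syms
  ((PySem.List.enumerate symbols_after_sync 0).filter
      (fun p => PySem.Int.mod p.1 period < chunk_syms)).map (fun p => p.2)

-- ===== PRECONDITION & SPEC =====
-- Pre_ admits the empty stream, nonnegative parameters with a positive period, and a stream of at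
-- most one chunk with a nonzero period; it excludes negative chunk_syms on a nonempty stream and
-- negative resync_syms when the stream exceeds one chunk (A's negative slice bounds and backward
-- index jumps give accidental results there), and a zero period (A loops forever or B's Python
-- raises ZeroDivisionError).
def Pre_strip_resync_symbols (symbols_after_sync : List Int) (chunk_syms : Int) (resync_syms : Int) : Prop :=
  symbols_after_sync = [] ∨
    (0 ≤ chunk_syms ∧ 0 ≤ resync_syms ∧ 0 < chunk_syms + resync_syms) ∨
    (0 < chunk_syms ∧ (symbols_after_sync.length : Int) ≤ chunk_syms ∧ chunk_syms + resync_syms ≠ 0)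

instance (symbols_after_sync : List Int) (chunk_syms : Int) (resync_syms : Int) : Decidable (Pre_strip_resync_symbols symbols_after_sync chunk_syms resync_syms) := by unfold Pre_strip_resync_symbols; infer_instance

def pvWitness_strip_resync_symbols : List Int × Int × Int := ([5, 6, 7, 8, 9], 2, 1)

def Spec_strip_resync_symbols (symbols_after_sync : List Int) (chunk_syms : Int) (resync_syms : Int) (out : List Int) : Prop := out = strip_resync_symbols_alt symbols_after_sync chunk_syms resync_syms
instance (symbols_after_sync : List Int) (chunk_syms : Int) (resync_syms : Int) (out : List Int) : Decidable (Spec_strip_resync_symbols symbols_after_sync chunk_syms resync_syms out) := by unfold Spec_strip_resync_symbols; infer_instance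

-- ===== CLAIM (what is proved, stated in full; the proofs are below) =====
def Claim_equal_strip_resync_symbols : Prop := ∀ (symbols_after_sync : List Int) (chunk_syms : Int) (resync_syms : Int), Dom_strip_resync_symbols symbols_after_sync chunk_syms resync_syms → Pre_strip_resync_symbols symbols_after_sync chunk_syms resync_syms → Spec_strip_resync_symbols symbols_after_sync chunk_syms resync_syms (strip_resync_symbols symbols_after_sync chunk_syms resync_syms)

-- ===== LEMMAS AND PROOFS =====

-- index-recursive form of B's filter: keep y at index j iff j % P < C
def altFN (C P : Nat) : Nat → List Int → List Int
  | _, [] => []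
  | j, y :: ys => (if j % P < C then [y] else []) ++ altFN C P (j + 1) ys

theorem altFN_bridge (c r : Int) (P : Nat) (hc : 0 ≤ c) (hp : 0 < c + r)
    (hPval : c + r = (P : Int)) :
    ∀ (ys : List Int) (j : Nat),
      ((PySem.List.enumerate ys (j : Int)).filter
          (fun p => PySem.Int.mod p.1 (c + r) < c)).map (fun p => p.2)
        = altFN c.toNat P j ys := by
  intro ys
  induction ys with
  | nil => intro j; simp [PySem.List.enumerate_nil, altFN]
  | cons y t ih =>
    intro j
    rw [PySem.List.enumerate_cons]
    have hmod : PySem.Int.mod (j : Int) (c + r) < c ↔ (j % P < c.toNat) := by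
      rw [PySem.Int.mod_eq_emod_of_pos hp, hPval, ← Int.natCast_mod]
      omega
    by_cases hk : j % P < c.toNat
    · rw [List.filter_cons_of_pos (by simpa [hmod] using hk)]
      simp only [List.map_cons, altFN, if_pos hk]
      have := ih (j + 1)
      push_cast at this ⊢
      rw [this]
      simp
    · rw [List.filter_cons_of_neg (by simpa [hmod] using hk)]
      simp only [altFN, if_neg hk]
      have := ih (j + 1)
      push_cast at this ⊢
      rw [this]
      simp

theorem altFN_shift (C P : Nat) : ∀ (ys : List Int) (j : Nat),
    altFN C P (j + P) ys = altFN C P j ys := by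
  intro ys
  induction ys with
  | nil => intro j; simp [altFN]
  | cons y t ih =>
    intro j
    simp only [altFN, Nat.add_mod_right]
    rw [show j + P + 1 = (j + 1) + P by omega, ih]

theorem altFN_kept (C P : Nat) (hCP : C ≤ P) :
    ∀ (k : Nat) (ys : List Int), k ≤ C →
      altFN C P (C - k) ys = ys.take k ++ altFN C P C (ys.drop k) := by
  intro k
  induction k with
  | zero => intro ys _; simp
  | succ k ih =>
    intro ys hk
    cases ys with
    | nil => simp [altFN]
    | cons y t =>
      have hlt : C - (k + 1) < C := by omega
      have hmod : (C - (k + 1)) % P = C - (k + 1) := Nat.mod_eq_of_lt (by omega)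
      simp only [altFN, hmod, if_pos hlt]
      rw [show C - (k + 1) + 1 = C - k by omega, ih t (by omega)]
      simp

theorem altFN_skip (C P : Nat) (hCP : C ≤ P) (hP : 0 < P) :
    ∀ (k : Nat) (ys : List Int), k ≤ P - C →
      altFN C P (P - k) ys = altFN C P P (ys.drop k) := by
  intro k
  induction k with
  | zero => intro ys _; simp
  | succ k ih =>
    intro ys hk
    cases ys with
    | nil => simp [altFN]
    | cons y t =>
      have hmod : (P - (k + 1)) % P = P - (k + 1) := Nat.mod_eq_of_lt (by omega)
      have hge : ¬ (P - (k + 1)) % P < C := by rw [hmod]; omega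
      simp only [altFN, if_neg hge]
      rw [show P - (k + 1) + 1 = P - k by omega, ih t (by omega)]
      simp

theorem altFN_period (C P : Nat) (hCP : C ≤ P) (hP : 0 < P) (ys : List Int) :
    altFN C P 0 ys = ys.take C ++ altFN C P 0 (ys.drop P) := by
  have h1 : altFN C P 0 ys = ys.take C ++ altFN C P C (ys.drop C) := by
    have := altFN_kept C P hCP C ys le_rfl
    simpa using this
  have h2 : altFN C P C (ys.drop C) = altFN C P P ((ys.drop C).drop (P - C)) := by
    have := altFN_skip C P hCP hP (P - C) (ys.drop C) le_rfl
    rw [show P - (P - C) = C by omega] at this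
    exact this
  have h3 : altFN C P P ((ys.drop C).drop (P - C)) = altFN C P 0 (ys.drop P) := by
    rw [List.drop_drop, show C + (P - C) = P by omega]
    have := altFN_shift C P (ys.drop P) 0
    simpa using this
  rw [h1, h2, h3]

theorem filt_all (c r : Int) (hc : 0 < c) (hr : r < 0) (hne : c + r ≠ 0) (ys : List Int) :
    ((PySem.List.enumerate ys 0).filter
        (fun p => PySem.Int.mod p.1 (c + r) < c)).map (fun p => p.2) = ys := by
  rw [List.filter_eq_self.mpr]
  · exact PySem.List.map_snd_enumerate ys 0
  · intro p hp
    rw [PySem.List.mem_enumerate_iff] at hp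
    obtain ⟨k, hk, rfl⟩ := hp
    simp only [decide_eq_true_eq]
    rcases lt_or_gt_of_ne hne with hP | hP
    · have := (PySem.Int.mod_neg_bounds (a := ((0 : Int) + (k : Int))) hP).2
      omega
    · rw [PySem.Int.mod_eq_emod_of_pos hP]
      have h1 := Int.emod_lt_of_pos ((0 : Int) + (k : Int)) hP
      omega

theorem loop_short (xs : List Int) (c r : Int) (hc : 0 < c)
    (hn : (xs.length : Int) ≤ c) (hn0 : 0 < (xs.length : Int)) :
    stripLoopA xs c r (xs.length : Int) 0 [] = xs := by
  rw [stripLoopA.eq_def]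
  rw [dif_pos hn0]
  have h1 : ¬ (0 + c < (xs.length : Int)) := by omega
  rw [if_neg h1]
  rw [dif_pos (show (0 : Int) < 0 + c by omega)]
  rw [stripLoopA.eq_def]
  rw [dif_neg (show ¬ (0 + c < (xs.length : Int)) by omega)]
  rw [PySem.List.slice_toNat xs (by omega) (by omega)]
  simp only [Int.toNat_zero, List.drop_zero, Nat.sub_zero, List.nil_append]
  apply List.take_of_length_le
  omega

theorem loop_eq (xs : List Int) (c r : Int) (hc : 0 ≤ c) (hr : 0 ≤ r) (hp : 0 < c + r) :
    ∀ (m : Nat) (i : Int) (out : List Int), 0 ≤ i → ((xs.length : Int) - i).toNat ≤ m →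
      stripLoopA xs c r (xs.length : Int) i out
        = out ++ altFN c.toNat (c.toNat + r.toNat) 0 (xs.drop i.toNat) := by
  intro m
  induction m with
  | zero =>
    intro i out hi hm
    rw [stripLoopA.eq_def]
    have hni : ¬ i < (xs.length : Int) := by omega
    rw [dif_neg hni]
    rw [List.drop_eq_nil_of_le (by omega)]
    simp [altFN]
  | succ m ih =>
    intro i out hi hm
    rw [stripLoopA.eq_def]
    by_cases hin : i < (xs.length : Int)
    · rw [dif_pos hin]
      have hCP : c.toNat ≤ c.toNat + r.toNat := by omega
      have hP : 0 < c.toNat + r.toNat := by omega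
      have hslice : PySem.List.slice xs (some i) (some (i + c))
          = (xs.drop i.toNat).take c.toNat := by
        rw [PySem.List.slice_toNat xs hi (by omega)]
        congr 1
        omega
      by_cases h1 : i + c < (xs.length : Int)
      · rw [if_pos h1]
        rw [dif_pos (show i < i + c + r by omega)]
        rw [ih (i + c + r) _ (by omega) (by omega)]
        rw [hslice]
        have hdd : xs.drop (i + c + r).toNat
            = (xs.drop i.toNat).drop (c.toNat + r.toNat) := by
          rw [List.drop_drop]
          congr 1
          omega
        rw [hdd, List.append_assoc]
        rw [← altFN_period c.toNat (c.toNat + r.toNat) hCP hP (xs.drop i.toNat)]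
      · rw [if_neg h1]
        have hc1 : 0 < c := by omega
        rw [dif_pos (show i < i + c by omega)]
        rw [ih (i + c) _ (by omega) (by omega)]
        rw [hslice]
        have hlen : (xs.drop i.toNat).length ≤ c.toNat := by
          simp only [List.length_drop]
          omega
        have hdC : xs.drop (i + c).toNat = [] := by
          apply List.drop_eq_nil_of_le
          omega
        rw [hdC]
        rw [altFN_period c.toNat (c.toNat + r.toNat) hCP hP (xs.drop i.toNat)]
        rw [List.drop_eq_nil_of_le (by omega : (xs.drop i.toNat).length ≤ c.toNat + r.toNat)]
        simp [altFN]
    · rw [dif_neg hin]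
      rw [List.drop_eq_nil_of_le (by omega)]
      simp [altFN]

-- ===== VERDICT (by name: the statement is the Claim_ definition above) =====
theorem strip_resync_symbols_spec : Claim_equal_strip_resync_symbols := by
  intro xs c r _hdom hpre
  unfold Spec_strip_resync_symbols strip_resync_symbols strip_resync_symbols_alt
  rcases eq_or_ne xs [] with rfl | hne
  · rw [stripLoopA.eq_def]
    simp [PySem.List.enumerate_nil]
  · have h0 : 0 < (xs.length : Int) := by
      have : xs.length ≠ 0 := fun h => hne (List.length_eq_zero_iff.mp h)
      omega
    by_cases harm : 0 ≤ c ∧ 0 ≤ r ∧ 0 < c + r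
    · obtain ⟨hc, hr, hp⟩ := harm
      rw [loop_eq xs c r hc hr hp ((xs.length : Int) - 0).toNat 0 [] le_rfl le_rfl]
      have hb := altFN_bridge c r (c.toNat + r.toNat) hc hp (by omega) xs 0
      simp only [Nat.cast_zero] at hb
      simp [hb]
    · obtain ⟨hc, hn, hp⟩ : 0 < c ∧ (xs.length : Int) ≤ c ∧ c + r ≠ 0 := by
        rcases hpre with h | h | h
        · exact absurd h hne
        · exact absurd h harm
        · exact h
      have hr : r < 0 := by
        by_contra hge
        exact harm ⟨by omega, by omega, by omega⟩
      rw [loop_short xs c r hc hn h0]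
      rw [filt_all c r hc hr hp xs]
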